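-- pv_equiv track=rewrite | github.com/tomertoor/wraith | PyWraith/src/pywraith/proto_gen/wraith_pb2.py | _varint_size
-- ===== SOURCE A (Python) =====
-- def _varint_size(value):
--     """Return the number of bytes needed to encode a varint."""
--     if value < 0:
--         return 10  # max varint size for signed encoding
--     result = 1
--     while value > 0x7f:
--         result += 1
--         value >>= 7
--     return result
-- ===== SOURCE B (Python) =====
-- def _varint_size(value):
--     """Return the number of bytes needed to encode a varint."""
--     if value < 0:
--         return 10  # max varint size for signed encoding
--     return max(1, (value.bit_length() + 6) // 7)
-- ===== Notes on version B (the rewrite author's own statement) =====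
-- stated objective: simpler
-- what changed: Replaced the shift-by-7 counting loop with a closed-form expression computed from value.bit_length().
import Mathlib
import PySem

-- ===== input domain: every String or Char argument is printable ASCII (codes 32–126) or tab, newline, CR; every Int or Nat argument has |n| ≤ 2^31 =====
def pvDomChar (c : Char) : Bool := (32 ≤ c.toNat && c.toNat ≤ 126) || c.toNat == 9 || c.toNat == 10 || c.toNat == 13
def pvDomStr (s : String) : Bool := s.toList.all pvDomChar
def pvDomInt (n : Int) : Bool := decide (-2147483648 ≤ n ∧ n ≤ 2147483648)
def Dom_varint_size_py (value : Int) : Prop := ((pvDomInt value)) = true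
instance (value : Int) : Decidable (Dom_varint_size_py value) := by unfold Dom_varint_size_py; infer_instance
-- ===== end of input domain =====

-- B replaces A's shift-by-7 counting loop with a closed form over value.bit_length() (objective: simpler).


-- ===== PORT A =====
-- the while loop of A: state (value, result)
def varintLoopA (value result : Int) : Int :=
  if 0x7f < value then
    varintLoopA (PySem.Int.floordiv value 128) (result + 1)  -- value >>= 7 is floor division by 2^7
  else result
termination_by value.toNat
decreasing_by
  rename_i h
  rw [PySem.Int.floordiv_eq_ediv_of_pos (by omega)]
  omega

def varint_size_py (value : Int) : Int :=
  if value < 0 then 10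
  else varintLoopA value 1

-- ===== PORT B =====
def varint_size_py_alt (value : Int) : Int :=
  if value < 0 then 10
  else max 1 (PySem.Int.floordiv ((PySem.Int.bitLength value : Int) + 6) 7)

-- ===== PRECONDITION & SPEC =====
def Spec_varint_size_py (value : Int) (out : Int) : Prop := out = varint_size_py_alt value
instance (value : Int) (out : Int) : Decidable (Spec_varint_size_py value out) := by unfold Spec_varint_size_py; infer_instance

-- ===== CLAIM (what is proved, stated in full; the proofs are below) =====
def Claim_equal_varint_size_py : Prop := ∀ (value : Int), Dom_varint_size_py value → Spec_varint_size_py value (varint_size_py value)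

-- ===== LEMMAS AND PROOFS =====

-- shifting a positive int right by 7 drops exactly 7 from its bit length
lemma bitLength_div128 (v : Int) (h : 127 < v) :
    PySem.Int.bitLength v = PySem.Int.bitLength (PySem.Int.floordiv v 128) + 7 := by
  have e : ∀ a : Int, 0 < a → PySem.Int.floordiv a 2 = a / 2 :=
    fun a _ => PySem.Int.floordiv_eq_ediv_of_pos (by omega)
  have e128 : PySem.Int.floordiv v 128 = v / 128 := PySem.Int.floordiv_eq_ediv_of_pos (by omega)
  rw [PySem.Int.bitLength_of_pos (show (0:Int) < v by omega), e _ (by omega),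
      PySem.Int.bitLength_of_pos (show (0:Int) < v / 2 by omega), e _ (by omega),
      PySem.Int.bitLength_of_pos (show (0:Int) < v / 2 / 2 by omega), e _ (by omega),
      PySem.Int.bitLength_of_pos (show (0:Int) < v / 2 / 2 / 2 by omega), e _ (by omega),
      PySem.Int.bitLength_of_pos (show (0:Int) < v / 2 / 2 / 2 / 2 by omega), e _ (by omega),
      PySem.Int.bitLength_of_pos (show (0:Int) < v / 2 / 2 / 2 / 2 / 2 by omega), e _ (by omega),
      PySem.Int.bitLength_of_pos (show (0:Int) < v / 2 / 2 / 2 / 2 / 2 / 2 by omega), e _ (by omega)]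
  have : v / 2 / 2 / 2 / 2 / 2 / 2 / 2 = v / 128 := by omega
  rw [this, e128]

lemma bitLength_le_seven (v : Int) (h0 : 0 ≤ v) (h : v ≤ 127) : PySem.Int.bitLength v ≤ 7 := by
  by_contra hgt
  have h8 : 8 ≤ PySem.Int.bitLength v := by omega
  have hv0 : v ≠ 0 := by
    intro h0'; rw [h0'] at h8; simp [PySem.Int.bitLength_zero] at h8
  have := PySem.Int.two_pow_bitLength_le v hv0
  have hmono : (2:Nat) ^ 7 ≤ 2 ^ (PySem.Int.bitLength v - 1) :=
    Nat.pow_le_pow_right (by omega) (by omega)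
  have : (128:Nat) ≤ v.natAbs := le_trans hmono this
  omega

lemma loopA_eq (n : Nat) : ∀ v : Int, 0 ≤ v → v.toNat = n → ∀ r : Int,
    varintLoopA v r = r + (((PySem.Int.bitLength v + 6) / 7 - 1 : Nat) : Int) := by
  induction n using Nat.strong_induction_on with
  | _ n ih =>
    intro v hv hn r
    rw [varintLoopA]
    split
    · rename_i h
      have hlt : (PySem.Int.floordiv v 128).toNat < n := by
        rw [PySem.Int.floordiv_eq_ediv_of_pos (by omega)]; omega
      have hpos : 0 ≤ PySem.Int.floordiv v 128 := by
        rw [PySem.Int.floordiv_eq_ediv_of_pos (by omega)]; omega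
      have hge1 : 1 ≤ PySem.Int.floordiv v 128 := by
        rw [PySem.Int.floordiv_eq_ediv_of_pos (by omega)]; omega
      have hB1 : 1 ≤ PySem.Int.bitLength (PySem.Int.floordiv v 128) := by
        rw [PySem.Int.bitLength_of_pos (by omega)]
        omega
      rw [ih _ hlt _ hpos rfl, bitLength_div128 v h]
      have harith : ((PySem.Int.bitLength (PySem.Int.floordiv v 128) + 7 + 6) / 7 - 1 : Nat)
          = ((PySem.Int.bitLength (PySem.Int.floordiv v 128) + 6) / 7 - 1) + 1 := by
        omega
      rw [harith]
      push_cast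
      ring
    · rename_i h
      have := bitLength_le_seven v hv (by omega)
      have : ((PySem.Int.bitLength v + 6) / 7 - 1 : Nat) = 0 := by omega
      rw [this]
      simp

-- ===== VERDICT (by name: the statement is the Claim_ definition above) =====
theorem varint_size_py_spec : Claim_equal_varint_size_py := by
  intro value _
  unfold Spec_varint_size_py varint_size_py varint_size_py_alt
  split
  · rfl
  · rename_i h
    rw [loopA_eq value.toNat value (by omega) rfl 1]
    have hcast : (PySem.Int.bitLength value : Int) + 6 = ((PySem.Int.bitLength value + 6 : Nat) : Int) := by
      push_cast; ring
    rw [hcast, show ((7:Int)) = ((7:Nat):Int) from rfl, PySem.Int.floordiv_natCast]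
    omega
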